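-- pv_equiv track=rewrite | github.com/timvink/mkdocs-enumerate-headings-plugin | mkdocs_enumerate_headings_plugin/markdown.py | headings
-- ===== SOURCE A (Python) =====
-- from typing import List
-- from collections import OrderedDict
--
-- def headings(lines: List[str]) -> OrderedDict:
--     """
--     Findings lines that are markdown headings
--     TODO: make sure empty headings are not counted like "#" or "# "
--
--     Args:
--         lines (list): List with lines (strings)
--
--     Returns:
--         headings (dict): line number (key) and line (str)
--     """
--     heading_lines = OrderedDict({})
--     is_block = False
--     n = 0
--     while n < len(lines):
--         if lines[n].startswith("```"):
--             is_block = not is_block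
--
--         if not is_block and lines[n].startswith("#"):
--             heading_lines[n] = lines[n]
--         n += 1
--
--     return heading_lines
-- ===== SOURCE B (Python) =====
-- from collections import OrderedDict
--
--
-- def headings(lines):
--     """Lines that are markdown headings: line number -> line, skipping fenced code blocks.
--
--     Split the document at ``` fence lines into segments; segments at even
--     positions (0, 2, ...) are outside any code block, so collect the '#'-lines
--     from those segments only. Fence lines themselves never start with '#'.
--     """
--     segments = [[]]
--     for n, line in enumerate(lines):
--         if line.startswith("```"):
--             segments.append([])
--         else:
--             segments[-1].append((n, line))
--     return OrderedDict(
--         (n, line)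
--         for seg in segments[0::2]
--         for (n, line) in seg
--         if line.startswith("#")
--     )
-- ===== Notes on version B (the rewrite author's own statement) =====
-- stated objective: alternative
-- what changed: Replaces A's single stateful scan with a toggled boolean flag by a split-at-fences decomposition: the lines are first partitioned into segments delimited by ``` fence lines, then the '#'-lines are collected from the even-indexed (outside-block) segments only.
import Mathlib
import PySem

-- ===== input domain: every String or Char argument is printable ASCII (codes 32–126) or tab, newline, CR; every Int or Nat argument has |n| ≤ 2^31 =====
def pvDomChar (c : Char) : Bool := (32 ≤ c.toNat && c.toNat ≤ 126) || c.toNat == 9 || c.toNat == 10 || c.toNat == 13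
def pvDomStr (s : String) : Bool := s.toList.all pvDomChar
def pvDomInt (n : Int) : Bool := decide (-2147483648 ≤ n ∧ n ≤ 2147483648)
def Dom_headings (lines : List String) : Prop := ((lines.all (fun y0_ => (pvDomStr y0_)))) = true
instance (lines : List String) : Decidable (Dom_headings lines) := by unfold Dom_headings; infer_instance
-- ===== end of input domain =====

-- B replaces A's single stateful flag-toggling scan by a split-at-fences
-- decomposition: partition the lines into segments delimited by ``` fence lines,
-- then collect '#'-lines from the even-indexed (outside-block) segments only
-- (alternative decomposition, same cost).

-- ===== PORT A =====
-- A's while-loop over n with the mutable is_block flag; the dict insert always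
-- uses the fresh key n (strictly increasing), so it appends to the association list.
def headingsGo : List String → Bool → Int → List (Int × String) → List (Int × String)
  | [], _, _, acc => acc
  | l :: rest, isBlock, n, acc =>
    let isBlock' := if PySem.Str.startswith l "```" then !isBlock else isBlock
    let acc' := if !isBlock' && PySem.Str.startswith l "#" then acc ++ [(n, l)] else acc
    headingsGo rest isBlock' (n + 1) acc'

def headings (lines : List String) : List (Int × String) :=
  headingsGo lines false 0 []

-- ===== PORT B =====
-- The for-loop building `segments`: Python appends to the LAST segment in place;
-- ported with `done` = the finished segments and `cur` = segments[-1].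
def segGo : List String → Int → List (List (Int × String)) → List (Int × String) →
    List (List (Int × String))
  | [], _, done, cur => done ++ [cur]
  | l :: rest, n, done, cur =>
    if PySem.Str.startswith l "```" then segGo rest (n + 1) (done ++ [cur]) []
    else segGo rest (n + 1) done (cur ++ [(n, l)])

-- segments[0::2]: every other element starting at index 0 (step-2 slice, ported by hand)
mutual
def evens {α : Type} : List α → List α
  | [] => []
  | x :: xs => x :: odds xs
-- the companion taking indices 1, 3, … of the original list
def odds {α : Type} : List α → List α
  | [] => []
  | _ :: xs => evens xs
end

def headings_alt (lines : List String) : List (Int × String) :=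
  let segments := segGo lines 0 [] []
  (evens segments).flatMap (fun seg => seg.filter (fun p => PySem.Str.startswith p.2 "#"))

-- ===== PRECONDITION & SPEC =====
def Spec_headings (lines : List String) (out : List (Int × String)) : Prop := out = headings_alt lines
instance (lines : List String) (out : List (Int × String)) : Decidable (Spec_headings lines out) := by unfold Spec_headings; infer_instance

-- ===== CLAIM (what is proved, stated in full; the proofs are below) =====
def Claim_equal_headings : Prop := ∀ (lines : List String), Dom_headings lines → Spec_headings lines (headings lines)

-- ===== LEMMAS AND PROOFS =====

-- the heading filter B applies to each outside segment
def filt (seg : List (Int × String)) : List (Int × String) :=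
  seg.filter (fun p => PySem.Str.startswith p.2 "#")

-- a fence line never counts as a heading line: it starts with '`', not '#'
theorem fence_not_heading (l : String) (h : PySem.Str.startswith l "```" = true) :
    PySem.Str.startswith l "#" = false := by
  rw [PySem.Str.startswith_eq] at *
  rw [PySem.Chars.startswith_iff] at h
  simp only [String.toList] at *
  obtain ⟨t, ht⟩ := h
  rw [← ht]
  have h3 : ("```" : String).toList = ['`', '`', '`'] := by decide
  have h1 : ("#" : String).toList = ['#'] := by decide
  simp only [String.toList] at h3 h1
  rw [h3, h1]
  simp [PySem.Chars.startswith, List.isPrefixOf]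

-- finished segments are only ever appended to: they can be factored out
theorem segGo_done (rest : List String) :
    ∀ (n : Int) (done : List (List (Int × String))) (cur : List (Int × String)),
    segGo rest n done cur = done ++ segGo rest n [] cur := by
  induction rest with
  | nil => intro n done cur; simp [segGo]
  | cons l rest ih =>
    intro n done cur
    simp only [segGo]
    split
    · simp only [List.nil_append]
      rw [ih (n + 1) (done ++ [cur]) [], ih (n + 1) [cur] []]; simp
    · exact ih (n + 1) done (cur ++ [(n, l)])

theorem filt_append (a b : List (Int × String)) : filt (a ++ b) = filt a ++ filt b := by
  simp [filt]

-- step lemmas reducing one iteration of each loop under the branch hypotheses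
theorem hG_fence_f (l : String) (rest : List String) (n : Int) (acc : List (Int × String))
    (hf : PySem.Str.startswith l "```" = true) (hnh : PySem.Str.startswith l "#" = false) :
    headingsGo (l :: rest) false n acc = headingsGo rest true (n + 1) acc := by
  simp only [headingsGo, hf, hnh]; simp

theorem hG_fence_t (l : String) (rest : List String) (n : Int) (acc : List (Int × String))
    (hf : PySem.Str.startswith l "```" = true) (hnh : PySem.Str.startswith l "#" = false) :
    headingsGo (l :: rest) true n acc = headingsGo rest false (n + 1) acc := by
  simp only [headingsGo, hf, hnh]; simp

theorem hG_f_head (l : String) (rest : List String) (n : Int) (acc : List (Int × String))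
    (hf : PySem.Str.startswith l "```" = false) (hh : PySem.Str.startswith l "#" = true) :
    headingsGo (l :: rest) false n acc = headingsGo rest false (n + 1) (acc ++ [(n, l)]) := by
  simp only [headingsGo, hf, hh]; simp

theorem hG_f_nohead (l : String) (rest : List String) (n : Int) (acc : List (Int × String))
    (hf : PySem.Str.startswith l "```" = false) (hh : PySem.Str.startswith l "#" = false) :
    headingsGo (l :: rest) false n acc = headingsGo rest false (n + 1) acc := by
  simp only [headingsGo, hf, hh]; simp

theorem hG_t_nofence (l : String) (rest : List String) (n : Int) (acc : List (Int × String))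
    (hf : PySem.Str.startswith l "```" = false) :
    headingsGo (l :: rest) true n acc = headingsGo rest true (n + 1) acc := by
  simp only [headingsGo, hf]; simp

theorem sG_fence (l : String) (rest : List String) (n : Int)
    (done : List (List (Int × String))) (cur : List (Int × String))
    (hf : PySem.Str.startswith l "```" = true) :
    segGo (l :: rest) n done cur = segGo rest (n + 1) (done ++ [cur]) [] := by
  simp only [segGo, hf]; simp

theorem sG_nofence (l : String) (rest : List String) (n : Int)
    (done : List (List (Int × String))) (cur : List (Int × String))
    (hf : PySem.Str.startswith l "```" = false) :
    segGo (l :: rest) n done cur = segGo rest (n + 1) done (cur ++ [(n, l)]) := by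
  simp only [segGo, hf]; simp

-- main invariant: A's scan with flag b equals the pending filtered current segment
-- plus (for b = false) the even- or (for b = true) the odd-indexed remaining segments
theorem headingsGo_segs (rest : List String) :
    ∀ (n : Int) (cur : List (Int × String)) (acc : List (Int × String)),
    (headingsGo rest false n (acc ++ filt cur) =
      acc ++ (evens (segGo rest n [] cur)).flatMap filt) ∧
    (headingsGo rest true n acc =
      acc ++ (odds (segGo rest n [] cur)).flatMap filt) := by
  induction rest with
  | nil =>
    intro n cur acc
    simp [headingsGo, segGo, evens, odds]
  | cons l rest ih =>
    intro n cur acc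
    by_cases hf : PySem.Str.startswith l "```" = true
    · have hnh := fence_not_heading l hf
      constructor
      · rw [hG_fence_f l rest n _ hf hnh, sG_fence l rest n [] cur hf,
          List.nil_append, segGo_done rest (n + 1) [cur] [],
          (ih (n + 1) [] (acc ++ filt cur)).2]
        simp [evens, odds]
      · rw [hG_fence_t l rest n acc hf hnh, sG_fence l rest n [] cur hf,
          List.nil_append, segGo_done rest (n + 1) [cur] []]
        have h2 := (ih (n + 1) [] acc).1
        simp only [filt, List.filter_nil, List.append_nil] at h2
        rw [h2]
        simp [evens, odds, filt]
    · have hf' : PySem.Str.startswith l "```" = false := by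
        cases hx : PySem.Str.startswith l "```" <;> simp_all
      constructor
      · by_cases hh : PySem.Str.startswith l "#" = true
        · rw [hG_f_head l rest n _ hf' hh, sG_nofence l rest n [] cur hf']
          have he : (acc ++ filt cur) ++ [(n, l)] = acc ++ filt (cur ++ [(n, l)]) := by
            have hh2 : PySem.Chars.startswith l.toList ['#'] = true := by
              rw [← show ("#" : String).toList = ['#'] from by decide, ← PySem.Str.startswith_eq]
              exact hh
            rw [filt_append]; simp [filt, hh2]
          rw [he, (ih (n + 1) (cur ++ [(n, l)]) acc).1]
        · have hh' : PySem.Str.startswith l "#" = false := by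
            cases hx : PySem.Str.startswith l "#" <;> simp_all
          rw [hG_f_nohead l rest n _ hf' hh', sG_nofence l rest n [] cur hf']
          have he : acc ++ filt cur = acc ++ filt (cur ++ [(n, l)]) := by
            have hh2 : PySem.Chars.startswith l.toList ['#'] = false := by
              rw [← show ("#" : String).toList = ['#'] from by decide, ← PySem.Str.startswith_eq]
              exact hh'
            rw [filt_append]; simp [filt, hh2]
          rw [he, (ih (n + 1) (cur ++ [(n, l)]) acc).1]
      · rw [hG_t_nofence l rest n acc hf', sG_nofence l rest n [] cur hf']
        exact (ih (n + 1) (cur ++ [(n, l)]) acc).2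

-- ===== VERDICT (by name: the statement is the Claim_ definition above) =====
theorem headings_spec : Claim_equal_headings := by
  intro lines _
  unfold Spec_headings headings headings_alt
  have h := (headingsGo_segs lines 0 [] []).1
  simp only [filt, List.filter_nil, List.append_nil, List.nil_append] at h
  rw [h]
  rfl
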